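-- pv_equiv track=rewrite | github.com/juan164/dynamics_devs | Prueba0002/fill_numbers.py | _fill_number_2
-- ===== SOURCE A (Python) =====
-- from functools import reduce
--
-- def _fill_number_2(arr : list) -> list:
--     arr = list(dict.fromkeys(arr))
--     upto = reduce(lambda acc, el: acc if acc >= el else el, arr)
--     for el in range(1, upto):
--         if el not in arr:
--             arr.append(el)
--     arr.sort()
--     return arr
-- ===== SOURCE B (Python) =====
-- def _fill_number_2(arr : list) -> list:
--     # Every integer 1..max(arr) is in the result by construction, so the result
--     # is just the sorted distinct elements below 1 followed by the full range 1..max.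
--     m = max(arr)
--     low = sorted({x for x in arr if x < 1})
--     return low + list(range(1, m + 1))
-- ===== Notes on version B (the rewrite author's own statement) =====
-- stated objective: faster
-- what changed: closed form instead of the fill loop: since all of 1..max(arr) is in the result by construction, B returns the sorted distinct elements below 1 concatenated with the literal range 1..max, with no membership tests or per-element filling at all
import Mathlib
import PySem

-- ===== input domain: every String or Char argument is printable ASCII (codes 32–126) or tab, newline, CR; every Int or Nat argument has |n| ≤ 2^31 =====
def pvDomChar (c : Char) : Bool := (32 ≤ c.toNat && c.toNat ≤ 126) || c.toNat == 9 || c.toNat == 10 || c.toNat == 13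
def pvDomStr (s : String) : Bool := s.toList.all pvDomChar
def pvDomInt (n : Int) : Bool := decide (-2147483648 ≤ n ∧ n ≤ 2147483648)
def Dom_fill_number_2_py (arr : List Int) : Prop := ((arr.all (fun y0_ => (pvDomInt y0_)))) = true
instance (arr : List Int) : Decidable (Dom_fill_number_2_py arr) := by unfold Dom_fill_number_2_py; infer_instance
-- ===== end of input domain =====

-- B replaces A's per-element fill loop by a closed form: the result is the sorted
-- distinct elements below 1 concatenated with the full range 1..max (same value).


-- ===== PORT A =====
def fill_number_2_py (arr : List Int) : List Int :=
  let arr1 := PySem.List.dedup arr           -- list(dict.fromkeys(arr))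
  match arr1 with
  | [] => []                                  -- unreachable: reduce([]) raises TypeError (excluded by Pre_)
  | a :: as =>
    let upto := as.foldl (fun acc el => if acc ≥ el then acc else el) a   -- reduce(lambda …)
    let arr2 := (PySem.List.pyRange 1 upto 1).foldl
      (fun acc el => if acc.contains el then acc else acc ++ [el]) (a :: as)  -- for el in range(1, upto): if el not in arr: arr.append(el)
    PySem.List.sorted arr2 (fun x => x) false                             -- arr.sort()

-- ===== PORT B =====
def fill_number_2_py_alt (arr : List Int) : List Int :=
  match arr with
  | [] => []                                  -- unreachable: max([]) raises ValueError (excluded by Pre_)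
  | h :: t =>
    let m := t.foldl max h                                                -- max(arr)
    let low := PySem.List.sorted
      (PySem.Set.ofList ((h :: t).filter (fun x => decide (x < 1))))      -- {x for x in arr if x < 1}
      (fun x => x) false                                                  -- sorted(…)
    low ++ PySem.List.pyRange 1 (m + 1) 1                                 -- low + list(range(1, m + 1))

-- ===== PRECONDITION & SPEC =====
-- Pre_ excludes only the empty list, on which A raises TypeError (reduce of an empty sequence).
def Pre_fill_number_2_py (arr : List Int) : Prop := arr ≠ []
instance (arr : List Int) : Decidable (Pre_fill_number_2_py arr) := by unfold Pre_fill_number_2_py; infer_instance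
def pvWitness_fill_number_2_py : List Int := [3, 1]
def Spec_fill_number_2_py (arr : List Int) (out : List Int) : Prop := out = fill_number_2_py_alt arr
instance (arr : List Int) (out : List Int) : Decidable (Spec_fill_number_2_py arr out) := by unfold Spec_fill_number_2_py; infer_instance

-- ===== CLAIM (what is proved, stated in full; the proofs are below) =====
def Claim_equal_fill_number_2_py : Prop := ∀ (arr : List Int), Dom_fill_number_2_py arr → Pre_fill_number_2_py arr → Spec_fill_number_2_py arr (fill_number_2_py arr)

-- ===== LEMMAS AND PROOFS =====

-- A's reduce lambda is max
theorem step_eq_max : (fun (acc el : Int) => if acc ≥ el then acc else el) = max := by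
  funext a b
  rcases le_total a b with h | h <;> simp [max_def] <;> omega

-- the running max is invariant under taking the max over any list with the same members
theorem foldl_max_eq_of_mem_iff (l₁ l₂ : List Int) (a : Int)
    (h : ∀ x, x ∈ a :: l₁ ↔ x ∈ a :: l₂) : l₁.foldl max a = l₂.foldl max a := by
  have h1 := PySem.List.le_foldl_max l₁ a
  have h2 := PySem.List.le_foldl_max l₂ a
  have m1 := PySem.List.foldl_max_mem l₁ a
  have m2 := PySem.List.foldl_max_mem l₂ a
  have hin1 : l₁.foldl max a ∈ a :: l₁ := by
    rcases m1 with e | e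
    · rw [e]; exact List.mem_cons_self ..
    · exact List.mem_cons_of_mem _ e
  have hin2 : l₂.foldl max a ∈ a :: l₂ := by
    rcases m2 with e | e
    · rw [e]; exact List.mem_cons_self ..
    · exact List.mem_cons_of_mem _ e
  apply le_antisymm
  · rcases List.mem_cons.mp ((h _).mp hin1) with e | e
    · rw [e]; exact h2.1
    · exact h2.2 _ e
  · rcases List.mem_cons.mp ((h _).mpr hin2) with e | e
    · rw [e]; exact h1.1
    · exact h1.2 _ e

-- A's append-if-absent loop is exactly set.update
theorem foldl_append_eq_update (r s : List Int) :
    r.foldl (fun acc el => if acc.contains el then acc else acc ++ [el]) s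
      = PySem.Set.update s r := by
  induction r generalizing s with
  | nil => simp [PySem.Set.update]
  | cons x xs ih =>
    rw [List.foldl_cons, PySem.Set.update_cons, ← ih]
    congr 1

theorem fill_eq (h : Int) (t : List Int) :
    fill_number_2_py (h :: t) = fill_number_2_py_alt (h :: t) := by
  unfold fill_number_2_py fill_number_2_py_alt
  rw [PySem.List.dedup_eq_ofList, PySem.Set.ofList_cons]
  simp only
  -- the reduce over the deduped list is the max of the whole list
  have hm : (PySem.Set.discard (PySem.Set.ofList t) h).foldl
      (fun acc el => if acc ≥ el then acc else el) h = t.foldl max h := by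
    rw [step_eq_max]
    apply foldl_max_eq_of_mem_iff
    intro x
    simp only [List.mem_cons, PySem.Set.mem_discard, PySem.Set.mem_ofList]
    constructor
    · rintro (rfl | ⟨hx, _⟩)
      · exact Or.inl rfl
      · exact Or.inr hx
    · rintro (rfl | hx)
      · exact Or.inl rfl
      · by_cases hxe : x = h
        · exact Or.inl hxe
        · exact Or.inr ⟨hx, hxe⟩
  rw [hm, foldl_append_eq_update, ← PySem.Set.ofList_cons]
  set m := t.foldl max h with hmdef
  have hmax := PySem.List.le_foldl_max t h
  have hmem : m = h ∨ m ∈ t := PySem.List.foldl_max_mem t h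
  -- the RHS is strictly increasing: sorted set below 1, then the range from 1
  have hpw : (PySem.List.sorted
      (PySem.Set.ofList ((h :: t).filter (fun x => decide (x < 1)))) (fun x => x) false
      ++ PySem.List.pyRange 1 (m + 1) 1).Pairwise (· < ·) := by
    apply List.pairwise_append.mpr
    refine ⟨PySem.List.sorted_ofList_pairwise_lt _, PySem.List.pairwise_lt_pyRange_one _ _, ?_⟩
    intro x hx y hy
    have hx1 : x < 1 := by
      have := (PySem.List.mem_sorted ..).mp hx
      have := (PySem.Set.mem_ofList ..).mp this
      have := (List.mem_filter.mp this).2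
      simpa using this
    have hy1 : 1 ≤ y := ((PySem.List.mem_pyRange_one ..).mp hy).1
    omega
  -- the RHS, as a candidate strictly increasing rearrangement of A's set
  refine PySem.List.sorted_eq_of_perm_of_pairwise_lt _ _ _ ?_ hpw
  -- Perm: both sides are Nodup with the same members
  apply (List.perm_ext_iff_of_nodup
    (hpw.imp (fun {a b} (hab : a < b) => Int.ne_of_lt hab) : List.Nodup _)
    (PySem.Set.nodup_update _ _ (PySem.Set.nodup_ofList _))).mpr
  intro x
  simp only [List.mem_append, PySem.List.mem_sorted, PySem.Set.mem_update,
    PySem.Set.mem_ofList, List.mem_filter, PySem.List.mem_pyRange_one, decide_eq_true_eq]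
  constructor
  · rintro (⟨hx, hlt⟩ | ⟨h1, h2⟩)
    · exact Or.inl hx
    · by_cases hxm : x < m
      · exact Or.inr ⟨h1, hxm⟩
      · have : x = m := by omega
        subst this
        rcases hmem with e | e
        · exact Or.inl (e ▸ List.mem_cons_self ..)
        · exact Or.inl (List.mem_cons_of_mem _ e)
  · rintro (hx | ⟨h1, h2⟩)
    · by_cases hlt : x < 1
      · exact Or.inl ⟨hx, hlt⟩
      · have hle : x ≤ m := by
          rcases List.mem_cons.mp hx with rfl | hx'
          · exact hmax.1
          · exact hmax.2 _ hx'
        exact Or.inr ⟨by omega, by omega⟩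
    · exact Or.inr ⟨h1, by omega⟩

-- ===== VERDICT (by name: the statement is the Claim_ definition above) =====
theorem fill_number_2_py_spec : Claim_equal_fill_number_2_py := by
  intro arr _ hpre
  unfold Spec_fill_number_2_py
  match arr, hpre with
  | h :: t, _ => exact fill_eq h t
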